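-- pv_equiv track=rewrite | github.com/Ch00k/ket | ket/utils.py | parse_pull_request_message
-- ===== SOURCE A (Python) =====
-- def parse_pull_request_message(data):
--     data = iter(data)
--     title = None
--     description = ''
--     while not title:
--         try:
--             line = next(data)
--         except StopIteration:
--             break
--         if not line.startswith('#'):
--             title = line.strip()
--     while True:
--         try:
--             line = next(data)
--         except StopIteration:
--             break
--         if not line.startswith('#'):
--             description += line
--     description = description.strip()
--     return title, description or None
-- ===== SOURCE B (Python) =====
-- def parse_pull_request_message(data):
--     # Staged: materialise the non-comment lines, count the blank prefix with an
--     # index loop, then read title by index and the description by slice + join.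
--     lines = [line for line in data if not line.startswith('#')]
--     k = 0
--     while k < len(lines) and not lines[k].strip():
--         k += 1
--     title = lines[k].strip() if k < len(lines) else None
--     description = ''.join(lines[k + 1:]).strip()
--     return title, description or None
-- ===== Notes on version B (the rewrite author's own statement) =====
-- stated objective: alternative
-- what changed: Replaces A's two sequential while/next loops over one shared iterator (with += string concatenation) by staged index arithmetic: filter the non-comment lines into a list, advance an index over the blank prefix, then read the title by index and build the description from the tail slice with one join.
-- intended difference: On inputs that contain a non-comment line but whose non-comment lines all strip to empty, A returns ('', None) because the stale empty strip of the last blank line leaks out of its loop, while B returns (None, None) - None is the intended 'no title' value the function itself uses when data is exhausted. — e.g. on parse_pull_request_message([" "]): A returns (some "", none), B returns (none, none)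
import Mathlib
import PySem

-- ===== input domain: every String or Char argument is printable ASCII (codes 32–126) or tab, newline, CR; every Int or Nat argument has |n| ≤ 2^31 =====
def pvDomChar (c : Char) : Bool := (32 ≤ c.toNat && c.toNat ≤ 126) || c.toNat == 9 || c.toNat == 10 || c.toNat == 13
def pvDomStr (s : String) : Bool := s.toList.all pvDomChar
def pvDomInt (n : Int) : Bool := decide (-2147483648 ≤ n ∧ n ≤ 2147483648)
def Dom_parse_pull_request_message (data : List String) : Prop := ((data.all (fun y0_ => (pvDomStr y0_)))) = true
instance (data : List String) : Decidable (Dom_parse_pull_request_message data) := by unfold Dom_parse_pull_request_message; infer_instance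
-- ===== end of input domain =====

-- B replaces A's two stateful shared-iterator loops by staged index arithmetic: filter the
-- non-comment lines into a list, count the blank prefix with an index loop, read the title by
-- index and the description by slice+join (alternative decomposition; same cost); A's stale
-- empty-string title on all-blank non-comment input is an intended difference (D_ below).

-- ===== PORT A =====
-- line.startswith('#') (the same call occurs in both Pythons)
def pvIsComment (line : String) : Bool := PySem.Str.startswith line "#"

-- Python truthiness of A's `title` (None or str)
def pvA_truthy : Option String → Bool
  | none => false
  | some s => decide (s ≠ "")

-- A's first while-loop: consumes lines until `title` is truthy, returns (title, rest of iterator)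
def pvA_loop1 : List String → Option String → Option String × List String
  | [], t => (t, [])
  | line :: rest, t =>
      let t' := if pvIsComment line then t else some (PySem.Str.strip line)
      if pvA_truthy t' then (t', rest) else pvA_loop1 rest t'

-- A's second while-loop: description += line for non-'#' lines
def pvA_desc (rest : List String) : String :=
  rest.foldl (fun acc line => if pvIsComment line then acc else acc ++ line) ""

def pvA_finish (r : Option String × List String) : Option String × Option String :=
  -- description = description.strip(); return title, description or None
  (r.1, if PySem.Str.strip (pvA_desc r.2) = "" then none
        else some (PySem.Str.strip (pvA_desc r.2)))

def parse_pull_request_message (data : List String) : Option String × Option String :=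
  pvA_finish (pvA_loop1 data none)

-- ===== PORT B =====
-- B's index loop: while k < len(lines) and not lines[k].strip(): k += 1
-- (fuel = remaining length is only a structural totality device; it never runs out)
def pvB_kAux : Nat → List String → Nat → Nat
  | 0, _, k => k
  | fuel + 1, lines, k =>
      if h : k < lines.length then
        if PySem.Str.strip lines[k] = "" then pvB_kAux fuel lines (k + 1) else k
      else k

def pvB_k (lines : List String) (k : Nat) : Nat := pvB_kAux (lines.length - k) lines k

def parse_pull_request_message_alt (data : List String) : Option String × Option String :=
  -- lines = [line for line in data if not line.startswith('#')]
  let lines := data.filter (fun l => !pvIsComment l)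
  let k := pvB_k lines 0
  -- title = lines[k].strip() if k < len(lines) else None
  let title : Option String := if h : k < lines.length then some (PySem.Str.strip lines[k]) else none
  -- description = ''.join(lines[k + 1:]).strip()
  let description := PySem.Str.strip (PySem.Str.join "" (PySem.List.slice lines (some ((k + 1 : Nat) : Int)) none))
  (title, if description = "" then none else some description)

-- ===== PRECONDITION & SPEC =====
-- On inputs that contain a non-'#' line but whose non-'#' lines all strip to empty, A returns
-- (some "", none) — the stale empty strip of the last blank line leaks out of its loop — while
-- B returns (none, none), the intended 'no title' value A itself uses on exhausted input.
def D_parse_pull_request_message (data : List String) : Prop :=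
  (∃ l ∈ data, pvIsComment l = false) ∧
  (∀ l ∈ data, pvIsComment l = false → PySem.Str.strip l = "")
instance (data : List String) : Decidable (D_parse_pull_request_message data) := by
  unfold D_parse_pull_request_message; infer_instance

def Spec_parse_pull_request_message (data : List String) (out : Option String × Option String) : Prop := ¬ D_parse_pull_request_message data → out = parse_pull_request_message_alt data
instance (data : List String) (out : Option String × Option String) : Decidable (Spec_parse_pull_request_message data out) := by unfold Spec_parse_pull_request_message; infer_instance

def pvDiffWitness_parse_pull_request_message : List String := ["  "]
def pvDiffWitnessOut_parse_pull_request_message : (Option String × Option String) × (Option String × Option String) :=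
  ((some "", none), (none, none))

-- ===== CLAIM (what is proved, stated in full; the proofs are below) =====
def Claim_unchanged_parse_pull_request_message : Prop := ∀ (data : List String), Dom_parse_pull_request_message data → Spec_parse_pull_request_message data (parse_pull_request_message data)
def Claim_changed_parse_pull_request_message : Prop := Dom_parse_pull_request_message (pvDiffWitness_parse_pull_request_message) ∧ D_parse_pull_request_message (pvDiffWitness_parse_pull_request_message) ∧ parse_pull_request_message (pvDiffWitness_parse_pull_request_message) = pvDiffWitnessOut_parse_pull_request_message.1 ∧ parse_pull_request_message_alt (pvDiffWitness_parse_pull_request_message) = pvDiffWitnessOut_parse_pull_request_message.2 ∧ pvDiffWitnessOut_parse_pull_request_message.1 ≠ pvDiffWitnessOut_parse_pull_request_message.2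
def Claim_exact_parse_pull_request_message : Prop := ∀ (data : List String), Dom_parse_pull_request_message data → D_parse_pull_request_message data → parse_pull_request_message data ≠ parse_pull_request_message_alt data

-- ===== LEMMAS AND PROOFS =====

-- proof-side helper: B's result as a head-recursive split of the filtered list
def pvB_split : List String → Option String × List String
  | [] => (none, [])
  | line :: rest =>
      let s := PySem.Str.strip line
      if s ≠ "" then (some s, rest) else pvB_split rest

def pvB_finish (p : Option String × List String) : Option String × Option String :=
  (p.1, if PySem.Str.strip (PySem.Str.join "" p.2) = "" then none
        else some (PySem.Str.strip (PySem.Str.join "" p.2)))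

-- the index loop commutes with consing a blank line in front
lemma pvB_kAux_succ (fuel : Nat) (l : String) (rest : List String) (k : Nat) :
    pvB_kAux fuel (l :: rest) (k + 1) = pvB_kAux fuel rest k + 1 := by
  induction fuel generalizing k with
  | zero => rfl
  | succ fuel ih =>
    rw [pvB_kAux, pvB_kAux]
    by_cases h : k < rest.length
    · rw [dif_pos (by simpa using h), dif_pos h]
      simp only [List.getElem_cons_succ]
      by_cases hs : PySem.Str.strip rest[k] = ""
      · rw [if_pos hs, if_pos hs, ih]
      · rw [if_neg hs, if_neg hs]
    · rw [dif_neg (by simpa using h), dif_neg h]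

lemma pvB_k_succ (l : String) (rest : List String) (k : Nat) :
    pvB_k (l :: rest) (k + 1) = pvB_k rest k + 1 := by
  unfold pvB_k
  rw [show (l :: rest).length - (k + 1) = rest.length - k by simp]
  exact pvB_kAux_succ _ l rest k

-- the index-loop/slice computation equals the head-recursive split
lemma pvB_k_split (F : List String) :
    ((if h : pvB_k F 0 < F.length then some (PySem.Str.strip F[pvB_k F 0]) else none),
      F.drop (pvB_k F 0 + 1)) = pvB_split F := by
  induction F with
  | nil =>
    simp [pvB_k, pvB_kAux, pvB_split]
  | cons l rest ih =>
    by_cases hs : PySem.Str.strip l = ""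
    · rw [show pvB_k (l :: rest) 0 = pvB_k (l :: rest) 1 from by
        rw [pvB_k, pvB_k]
        simp only [List.length_cons, Nat.sub_zero, Nat.add_sub_cancel]
        rw [pvB_kAux, dif_pos (by simp), if_pos (by simpa using hs)]]
      rw [pvB_k_succ]
      simp only [pvB_split, hs, ne_eq, not_true_eq_false, if_false]
      rw [← ih]
      have h1 : (if h : pvB_k rest 0 + 1 < (l :: rest).length then
            some (PySem.Str.strip (l :: rest)[pvB_k rest 0 + 1]) else none) =
          (if h : pvB_k rest 0 < rest.length then
            some (PySem.Str.strip rest[pvB_k rest 0]) else none) := by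
        by_cases hlt : pvB_k rest 0 < rest.length
        · rw [dif_pos (by simpa using hlt), dif_pos hlt]
          simp
        · rw [dif_neg (by simpa using hlt), dif_neg hlt]
      rw [h1]
      simp
    · rw [show pvB_k (l :: rest) 0 = 0 from by
        rw [pvB_k]
        simp only [List.length_cons, Nat.sub_zero]
        rw [pvB_kAux, dif_pos (by simp), if_neg (by simpa using hs)]]
      simp [pvB_split, hs]

-- B's port computes pvB_finish ∘ pvB_split of the filtered lines
lemma pvB_alt_eq (data : List String) :
    parse_pull_request_message_alt data =
      pvB_finish (pvB_split (data.filter (fun l => !pvIsComment l))) := by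
  unfold parse_pull_request_message_alt pvB_finish
  dsimp only
  rw [PySem.List.slice_from_natCast, ← pvB_k_split (data.filter (fun l => !pvIsComment l))]

-- ''.join over an empty separator peels off the head string
lemma pv_join_empty_cons (x : String) (ys : List String) :
    PySem.Str.join "" (x :: ys) = x ++ PySem.Str.join "" ys := by
  apply String.toList_inj.mp
  simp [PySem.Str.toList_join]
  cases ys with
  | nil => simp [PySem.Chars.join_singleton, PySem.Chars.join_nil]
  | cons y ys => simp [PySem.Chars.join_cons_cons]

-- if all non-'#' lines strip to empty, A's first loop exhausts the input
lemma pvA_loop1_blank (data : List String) (t : Option String) (ht : pvA_truthy t = false)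
    (hb : ∀ l ∈ data, pvIsComment l = false → PySem.Str.strip l = "") :
    pvA_loop1 data t =
      ((if data.any (fun l => !pvIsComment l) then some "" else t), []) := by
  induction data generalizing t with
  | nil => simp [pvA_loop1]
  | cons line rest ih =>
    by_cases h : pvIsComment line = true
    · simp [pvA_loop1, h, ht, ih t ht (fun l hl => hb l (List.mem_cons_of_mem _ hl))]
    · have hs : PySem.Str.strip line = "" :=
        hb line List.mem_cons_self (by simpa using h)
      have ht' : pvA_truthy (some "") = false := by decide
      simp [pvA_loop1, h, hs, ht',
        ih (some "") ht' (fun l hl => hb l (List.mem_cons_of_mem _ hl))]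

-- if all lines strip to empty, the split finds no title
lemma pvB_split_blank (xs : List String) (hb : ∀ l ∈ xs, PySem.Str.strip l = "") :
    pvB_split xs = (none, []) := by
  induction xs with
  | nil => rfl
  | cons line rest ih =>
    have hs : PySem.Str.strip line = "" := hb line List.mem_cons_self
    simp [pvB_split, hs, ih (fun l hl => hb l (List.mem_cons_of_mem _ hl))]

-- main correspondence when some non-'#' line has a non-empty strip
lemma pv_found (data : List String) (t : Option String) (ht : pvA_truthy t = false)
    (hx : ∃ l ∈ data, pvIsComment l = false ∧ PySem.Str.strip l ≠ "") :
    (pvA_loop1 data t).1 = (pvB_split (data.filter (fun l => !pvIsComment l))).1 ∧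
    ((pvA_loop1 data t).2.filter (fun l => !pvIsComment l)) =
      (pvB_split (data.filter (fun l => !pvIsComment l))).2 := by
  induction data generalizing t with
  | nil => simp at hx
  | cons line rest ih =>
    by_cases h : pvIsComment line = true
    · have hx' : ∃ l ∈ rest, pvIsComment l = false ∧
          PySem.Str.strip l ≠ "" := by
        rcases hx with ⟨l, hl, hf, hs⟩
        rcases List.mem_cons.mp hl with rfl | hl'
        · rw [h] at hf; exact absurd hf (by simp)
        · exact ⟨l, hl', hf, hs⟩
      simpa [pvA_loop1, h, ht] using ih t ht hx'
    · by_cases hs : PySem.Str.strip line = ""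
      · have ht' : pvA_truthy (some "") = false := by decide
        have hx' : ∃ l ∈ rest, pvIsComment l = false ∧
            PySem.Str.strip l ≠ "" := by
          rcases hx with ⟨l, hl, hf, hsl⟩
          rcases List.mem_cons.mp hl with rfl | hl'
          · exact absurd hs hsl
          · exact ⟨l, hl', hf, hsl⟩
        simpa [pvA_loop1, pvB_split, h, hs, ht'] using ih (some "") ht' hx'
      · have htr : pvA_truthy (some (PySem.Str.strip line)) = true := by
          simp [pvA_truthy, hs]
        simp [pvA_loop1, pvB_split, h, hs, htr]

-- A's concatenating loop equals ''.join of the filtered lines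
lemma pvA_desc_aux (xs : List String) (a : String) :
    xs.foldl (fun acc line => if pvIsComment line then acc else acc ++ line) a =
      a ++ PySem.Str.join "" (xs.filter (fun l => !pvIsComment l)) := by
  induction xs generalizing a with
  | nil =>
    apply String.toList_inj.mp
    simp [PySem.Str.toList_join, PySem.Chars.join_nil]
  | cons line rest ih =>
    by_cases h : pvIsComment line = true
    · simp [h, ih a]
    · rw [List.foldl_cons, if_neg h, ih (a ++ line),
        List.filter_cons_of_pos (by simp [Bool.not_eq_true] at h ⊢; exact h),
        pv_join_empty_cons, String.append_assoc]

lemma pvA_desc_eq (xs : List String) :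
    pvA_desc xs = PySem.Str.join "" (xs.filter (fun l => !pvIsComment l)) := by
  have h := pvA_desc_aux xs ""
  apply String.toList_inj.mp
  apply_fun String.toList at h
  simpa [pvA_desc] using h

-- ===== VERDICT (by name: the statement is the Claim_ definition above) =====
theorem parse_pull_request_message_spec : Claim_unchanged_parse_pull_request_message := by
  intro data _ hnD
  show parse_pull_request_message data = parse_pull_request_message_alt data
  rw [pvB_alt_eq]
  unfold parse_pull_request_message
  by_cases hb : ∀ l ∈ data, pvIsComment l = false → PySem.Str.strip l = ""
  · -- every non-'#' line is blank; since ¬D_, there is no non-'#' line at all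
    have hnone : ∀ l ∈ data, pvIsComment l = true := by
      intro l hl
      by_contra hf
      exact hnD ⟨⟨l, hl, by simpa using hf⟩, hb⟩
    have hany : data.any (fun l => !pvIsComment l) = false := by
      simp only [List.any_eq_false]
      intro l hl
      simpa using hnone l hl
    have hfilt : data.filter (fun l => !pvIsComment l) = [] := by
      simp only [List.filter_eq_nil_iff]
      intro l hl
      simpa using hnone l hl
    rw [pvA_loop1_blank data none rfl hb, hfilt]
    rw [show (data.any fun l => !pvIsComment l) = false from hany]
    decide
  · push Not at hb
    obtain ⟨l, hl, hf, hs⟩ := hb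
    obtain ⟨h1, h2⟩ := pv_found data none rfl ⟨l, hl, hf, hs⟩
    unfold pvA_finish pvB_finish
    rw [pvA_desc_eq, h2, h1]

theorem parse_pull_request_message_changed : Claim_changed_parse_pull_request_message := by
  unfold Claim_changed_parse_pull_request_message; decide

theorem parse_pull_request_message_tight : Claim_exact_parse_pull_request_message := by
  intro data _ hD heq
  obtain ⟨⟨l, hl, hf⟩, hb⟩ := hD
  have hany : data.any (fun l => !pvIsComment l) = true := by
    simp only [List.any_eq_true]
    exact ⟨l, hl, by simp [hf]⟩
  have hA : (parse_pull_request_message data).1 = some "" := by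
    unfold parse_pull_request_message
    rw [pvA_loop1_blank data none rfl hb, hany]
    rfl
  have hB : (parse_pull_request_message_alt data).1 = none := by
    rw [pvB_alt_eq]
    rw [pvB_split_blank _ (fun x hx => hb x (List.mem_filter.mp hx).1
      (by simpa using (List.mem_filter.mp hx).2))]
    rfl
  rw [heq, pvB_alt_eq] at hA
  rw [pvB_alt_eq] at hB
  rw [hB] at hA
  simp at hA
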